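-- pv_equiv track=rewrite | github.com/pypi-data/pypi-mirror-63 | packages/dsdobjects/dsdobjects-0.7.1-py3-none-any.whl/dsdobjects/utils.py | pair_table_to_dot_bracket
-- ===== SOURCE A (Python) =====
-- def pair_table_to_dot_bracket(pt, strand_break='+'):
--     """
--     Inverse of the make_pair_table function.
--     """
--     assert len(strand_break) == 1
--     out = []
--     for si, strand in enumerate(pt):
--         if out: out.append(strand_break)
--         for di, pair in enumerate(strand):
--             if pair is None:
--                 out.append('.')
--             else :
--                 locus = (si, di)
--                 if locus < pair :
--                     out.append('(')
--                 else :
--                     out.append(')')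
--     return out
-- ===== SOURCE B (Python) =====
-- def pair_table_to_dot_bracket(pt, strand_break='+'):
--     assert len(strand_break) == 1
--     # Phase 1: lay out a skeleton of '.' runs separated by strand breaks,
--     # recording where each strand starts in the flat output.
--     out = []
--     starts = []
--     for si, strand in enumerate(pt):
--         if si:
--             out.append(strand_break)
--         starts.append(len(out))
--         out.extend(['.'] * len(strand))
--     # Phase 2: overwrite only the paired positions in place.
--     for start, (si, strand) in zip(starts, enumerate(pt)):
--         for di, pair in enumerate(strand):
--             if pair is not None:
--                 out[start + di] = '(' if (si, di) < pair else ')'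
--     return out
-- ===== Notes on version B (the rewrite author's own statement) =====
-- stated objective: alternative
-- what changed: B replaces A's single streaming pass (appending one symbol per locus, with a break whenever output is nonempty) by a two-phase skeleton-and-patch algorithm: it first preallocates the whole output as dot runs joined by strand breaks while recording each strand's flat offset, then patches only the paired positions in place by random-access index writes.
-- outside the precondition, e.g. on pair_table_to_dot_bracket([[], [None]], '+'): A returns ['.'], B returns ['+', '.']
import Mathlib
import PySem

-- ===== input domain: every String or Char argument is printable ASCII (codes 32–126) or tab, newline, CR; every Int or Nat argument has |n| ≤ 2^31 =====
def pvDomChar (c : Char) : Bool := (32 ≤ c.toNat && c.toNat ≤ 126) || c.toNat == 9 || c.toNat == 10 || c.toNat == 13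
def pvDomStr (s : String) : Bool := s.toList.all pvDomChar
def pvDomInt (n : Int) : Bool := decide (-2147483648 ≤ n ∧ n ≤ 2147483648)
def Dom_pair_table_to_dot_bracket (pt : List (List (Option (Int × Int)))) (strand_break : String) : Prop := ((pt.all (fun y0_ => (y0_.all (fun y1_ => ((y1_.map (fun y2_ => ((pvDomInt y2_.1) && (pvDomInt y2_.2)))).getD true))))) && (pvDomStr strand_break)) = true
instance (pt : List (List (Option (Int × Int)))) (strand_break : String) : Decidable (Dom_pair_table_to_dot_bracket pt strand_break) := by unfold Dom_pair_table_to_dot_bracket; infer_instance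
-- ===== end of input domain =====

-- B replaces A's streaming one-symbol-at-a-time pass by a skeleton-and-patch algorithm:
-- preallocate dot runs joined by breaks, record each strand's offset, then overwrite the
-- paired positions in place (objective: alternative).

-- ===== PORT A =====
def pair_table_to_dot_bracket (pt : List (List (Option (Int × Int)))) (strand_break : String) : List String :=
  (PySem.List.enumerate pt).foldl (fun out sis =>
    let out := if out ≠ [] then out ++ [strand_break] else out
    (PySem.List.enumerate sis.2).foldl (fun out dip =>
      match dip.2 with
      | none => out ++ ["."]
      | some pair =>
        -- Python tuple comparison (si, di) < pair, lexicographic on ints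
        if sis.1 < pair.1 ∨ (sis.1 = pair.1 ∧ dip.1 < pair.2) then out ++ ["("] else out ++ [")"]) out) []

-- ===== PORT B =====
-- '(' if (si, di) < pair else ')'  (Python tuple comparison, lexicographic on ints)
def pvParen (si di : Int) (pair : Int × Int) : String :=
  if si < pair.1 ∨ (si = pair.1 ∧ di < pair.2) then "(" else ")"

def pair_table_to_dot_bracket_alt (pt : List (List (Option (Int × Int)))) (strand_break : String) : List String :=
  -- phase 1: skeleton of '.' runs joined by breaks + the list of strand offsets
  let p1 := (PySem.List.enumerate pt).foldl
    (fun (acc : List String × List Int) sis =>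
      let out := if sis.1 ≠ 0 then acc.1 ++ [strand_break] else acc.1
      let starts := acc.2 ++ [(out.length : Int)]
      (out ++ List.replicate sis.2.length ".", starts)) ([], [])
  -- phase 2: patch the paired positions in place (out[start + di] = …)
  (p1.2.zip (PySem.List.enumerate pt)).foldl
    (fun out ssis =>
      (PySem.List.enumerate ssis.2.2).foldl
        (fun out dip =>
          match dip.2 with
          | none => out
          | some pair => PySem.List.pySetD out (ssis.1 + dip.1) (pvParen ssis.2.1 dip.1 pair)) out) p1.1

-- ===== PRECONDITION & SPEC =====
-- Pre_ excludes strand_break of length ≠ 1 (A raises AssertionError), and tables of ≥ 2 strands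
-- whose FIRST strand is empty: there A's strand-break placement (a break is dropped while the
-- accumulated output is still empty) and B's (a break before every strand but the first) are both
-- defensible readings of an input a real pair table never has.
def Pre_pair_table_to_dot_bracket (pt : List (List (Option (Int × Int)))) (strand_break : String) : Prop :=
  strand_break.length = 1 ∧ (pt.length ≤ 1 ∨ pt.head? ≠ some [])
instance (pt : List (List (Option (Int × Int)))) (strand_break : String) : Decidable (Pre_pair_table_to_dot_bracket pt strand_break) := by unfold Pre_pair_table_to_dot_bracket; infer_instance

def pvWitness_pair_table_to_dot_bracket : (List (List (Option (Int × Int)))) × String :=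
  ([[none, some (0, 0)], [some (0, 1), none]], "+")

def Spec_pair_table_to_dot_bracket (pt : List (List (Option (Int × Int)))) (strand_break : String) (out : List String) : Prop := out = pair_table_to_dot_bracket_alt pt strand_break
instance (pt : List (List (Option (Int × Int)))) (strand_break : String) (out : List String) : Decidable (Spec_pair_table_to_dot_bracket pt strand_break out) := by unfold Spec_pair_table_to_dot_bracket; infer_instance

-- ===== CLAIM (what is proved, stated in full; the proofs are below) =====
def Claim_equal_pair_table_to_dot_bracket : Prop := ∀ (pt : List (List (Option (Int × Int)))) (strand_break : String), Dom_pair_table_to_dot_bracket pt strand_break → Pre_pair_table_to_dot_bracket pt strand_break → Spec_pair_table_to_dot_bracket pt strand_break (pair_table_to_dot_bracket pt strand_break)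

-- ===== LEMMAS AND PROOFS =====

-- the symbol list one strand contributes
def pvSymStrand (si : Int) (s : List (Option (Int × Int))) : List String :=
  (PySem.List.enumerate s).map (fun dip =>
    match dip.2 with
    | none => "."
    | some pair => pvParen si dip.1 pair)

-- the '.' run of one strand
def pvDots (s : List (Option (Int × Int))) : List String := List.replicate s.length "."

-- the offsets phase 1 records for the strands AFTER the first, given the length so far
def pvStartsB : Nat → List (List (Option (Int × Int))) → List Int
  | _, [] => []
  | n, s :: t => ((n + 1 : Nat) : Int) :: pvStartsB (n + 1 + s.length) t

lemma pvSymStrand_length (si : Int) (s : List (Option (Int × Int))) :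
    (pvSymStrand si s).length = s.length := by
  simp [pvSymStrand, PySem.List.length_enumerate]

lemma set_append_len {α : Type} (pref : List α) (x v : α) (rest : List α) :
    (pref ++ x :: rest).set pref.length v = pref ++ v :: rest := by
  induction pref with
  | nil => rfl
  | cons h t ih => simp [ih]

-- A's inner loop appends exactly the strand's symbol list.
lemma innerA (si : Int) (s : List (Option (Int × Int))) (k : Int) (out : List String) :
    (PySem.List.enumerate s k).foldl (fun out dip =>
      match dip.2 with
      | none => out ++ ["."]
      | some pair =>
        if si < pair.1 ∨ (si = pair.1 ∧ dip.1 < pair.2) then out ++ ["("] else out ++ [")"]) out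
    = out ++ (PySem.List.enumerate s k).map (fun dip =>
        match dip.2 with
        | none => "."
        | some pair => pvParen si dip.1 pair) := by
  induction s generalizing k out with
  | nil => simp [PySem.List.enumerate_nil]
  | cons h t ih =>
    cases hp : h with
    | none => simp [PySem.List.enumerate_cons, ih]
    | some pair =>
      simp only [PySem.List.enumerate_cons, List.foldl_cons, List.map_cons, ih, pvParen]
      split <;> simp

-- Once the accumulator is nonempty, A's conditional break is always taken and each
-- remaining strand contributes a break followed by its symbol list.
lemma outerA (sb : String) (t : List (List (Option (Int × Int)))) (k : Int) (a : List String)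
    (ha : a ≠ []) :
    (PySem.List.enumerate t k).foldl (fun out sis =>
      (PySem.List.enumerate sis.2).foldl (fun out dip =>
        match dip.2 with
        | none => out ++ ["."]
        | some pair =>
          if sis.1 < pair.1 ∨ (sis.1 = pair.1 ∧ dip.1 < pair.2) then out ++ ["("] else out ++ [")"])
        (if out ≠ [] then out ++ [sb] else out)) a
    = a ++ (PySem.List.enumerate t k).flatMap (fun sis => sb :: pvSymStrand sis.1 sis.2) := by
  induction t generalizing k a with
  | nil => simp [PySem.List.enumerate_nil]
  | cons s t ih =>
    simp only [PySem.List.enumerate_cons, List.foldl_cons, List.flatMap_cons]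
    rw [if_pos ha, innerA]
    rw [ih _ _ (by simp)]
    simp [pvSymStrand]

-- Phase 1 of B on the strands after the first: appends a break and a '.' run per strand
-- and records the offsets.
lemma phase1Rest (sb : String) (t : List (List (Option (Int × Int)))) (k : Int) (hk : 1 ≤ k)
    (out : List String) (sts : List Int) :
    (PySem.List.enumerate t k).foldl
      (fun (acc : List String × List Int) sis =>
        ((if sis.1 ≠ 0 then acc.1 ++ [sb] else acc.1) ++ List.replicate sis.2.length ".",
         acc.2 ++ [((if sis.1 ≠ 0 then acc.1 ++ [sb] else acc.1).length : Int)])) (out, sts)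
    = (out ++ t.flatMap (fun s => sb :: pvDots s), sts ++ pvStartsB out.length t) := by
  induction t generalizing k out sts with
  | nil => simp [PySem.List.enumerate_nil, pvStartsB]
  | cons s t ih =>
    simp only [PySem.List.enumerate_cons, List.foldl_cons, List.flatMap_cons, pvStartsB]
    rw [if_pos (show k ≠ 0 by omega)]
    rw [ih (k + 1) (by omega)]
    have hl : ((out ++ [sb]) ++ List.replicate s.length ".").length = out.length + 1 + s.length := by
      simp
      omega
    rw [hl]
    simp [pvDots]

-- Phase 2's inner loop patches exactly one '.' run into the strand's symbol list.
lemma patchGen (si : Int) (s : List (Option (Int × Int))) (k start : Int)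
    (pref suf : List String) (hlen : start + k = (pref.length : Int)) :
    (PySem.List.enumerate s k).foldl
      (fun out dip =>
        match dip.2 with
        | none => out
        | some pair => PySem.List.pySetD out (start + dip.1) (pvParen si dip.1 pair))
      (pref ++ List.replicate s.length "." ++ suf)
    = pref ++ (PySem.List.enumerate s k).map (fun dip =>
        match dip.2 with
        | none => "."
        | some pair => pvParen si dip.1 pair) ++ suf := by
  induction s generalizing k pref with
  | nil => simp [PySem.List.enumerate_nil]
  | cons h t ih =>
    cases hp : h with
    | none =>
      simp only [PySem.List.enumerate_cons, List.foldl_cons, List.map_cons, List.length_cons,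
        List.replicate_succ]
      have h1 : pref ++ ("." :: List.replicate t.length ".") ++ suf
          = (pref ++ ["."]) ++ List.replicate t.length "." ++ suf := by simp
      rw [h1, ih (k + 1) (pref ++ ["."]) (by simp; omega)]
      simp
    | some pair =>
      simp only [PySem.List.enumerate_cons, List.foldl_cons, List.map_cons, List.length_cons,
        List.replicate_succ]
      have h1 : pref ++ ("." :: List.replicate t.length ".") ++ suf
          = pref ++ "." :: (List.replicate t.length "." ++ suf) := by simp
      rw [h1]
      have hset : PySem.List.pySetD (pref ++ "." :: (List.replicate t.length "." ++ suf))
          (start + k) (pvParen si k pair)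
          = (pref ++ [pvParen si k pair]) ++ List.replicate t.length "." ++ suf := by
        rw [PySem.List.pySetD_of_nonneg _ _ (by omega)]
        have h2 : (start + k).toNat = pref.length := by omega
        rw [h2, set_append_len]
        simp
      rw [hset, ih (k + 1) (pref ++ [pvParen si k pair]) (by simp; omega)]
      simp

-- Phase 2 on the strands after the first.
lemma phase2Rest (sb : String) (t : List (List (Option (Int × Int)))) (k : Int)
    (pref : List String) :
    ((pvStartsB pref.length t).zip (PySem.List.enumerate t k)).foldl
      (fun out ssis =>
        (PySem.List.enumerate ssis.2.2).foldl
          (fun out dip =>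
            match dip.2 with
            | none => out
            | some pair => PySem.List.pySetD out (ssis.1 + dip.1) (pvParen ssis.2.1 dip.1 pair)) out)
      (pref ++ t.flatMap (fun s => sb :: pvDots s))
    = pref ++ (PySem.List.enumerate t k).flatMap (fun sis => sb :: pvSymStrand sis.1 sis.2) := by
  induction t generalizing k pref with
  | nil => simp [PySem.List.enumerate_nil, pvStartsB]
  | cons s t ih =>
    simp only [PySem.List.enumerate_cons, pvStartsB, List.zip_cons_cons, List.foldl_cons,
      List.flatMap_cons]
    have h1 : pref ++ (sb :: pvDots s ++ List.flatMap (fun s => sb :: pvDots s) t)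
        = (pref ++ [sb]) ++ List.replicate s.length "." ++ List.flatMap (fun s => sb :: pvDots s) t := by
      simp [pvDots]
    rw [h1]
    rw [patchGen k s 0 ((pref.length + 1 : Nat) : Int) (pref ++ [sb])
      (List.flatMap (fun s => sb :: pvDots s) t) (by simp)]
    have h2 : (pref ++ [sb]) ++ (PySem.List.enumerate s).map (fun dip =>
          match dip.2 with
          | none => "."
          | some pair => pvParen k dip.1 pair) ++ List.flatMap (fun s => sb :: pvDots s) t
        = (pref ++ sb :: pvSymStrand k s) ++ List.flatMap (fun s => sb :: pvDots s) t := by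
      simp [pvSymStrand]
    rw [h2]
    rw [show pref.length + 1 + s.length = (pref ++ sb :: pvSymStrand k s).length from by
      simp [pvSymStrand_length]
      omega]
    rw [ih (k + 1) (pref ++ sb :: pvSymStrand k s)]
    simp

-- Closed form of A on a nonempty table (first strand nonempty, or a single strand).
lemma Aclosed (sb : String) (h : List (Option (Int × Int))) (t : List (List (Option (Int × Int))))
    (hpre : t = [] ∨ h ≠ []) :
    pair_table_to_dot_bracket (h :: t) sb
    = pvSymStrand 0 h ++ (PySem.List.enumerate t 1).flatMap (fun sis => sb :: pvSymStrand sis.1 sis.2) := by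
  unfold pair_table_to_dot_bracket
  simp only [PySem.List.enumerate_cons, List.foldl_cons, zero_add]
  rw [if_neg (show ¬ (([] : List String) ≠ []) from by simp)]
  rw [innerA 0 h 0 []]
  simp only [List.nil_append]
  rw [show ((PySem.List.enumerate h).map fun dip =>
      match dip.2 with
      | none => "."
      | some pair => pvParen 0 dip.1 pair) = pvSymStrand 0 h from rfl]
  rcases hpre with ht | hh
  · subst ht
    simp [PySem.List.enumerate_nil]
  · exact outerA sb t 1 (pvSymStrand 0 h) (by
      intro hc
      apply hh
      have := pvSymStrand_length 0 h
      rw [hc] at this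
      exact List.length_eq_zero_iff.mp this.symm)

-- Closed form of B on any nonempty table.
lemma Bclosed (sb : String) (h : List (Option (Int × Int))) (t : List (List (Option (Int × Int)))) :
    pair_table_to_dot_bracket_alt (h :: t) sb
    = pvSymStrand 0 h ++ (PySem.List.enumerate t 1).flatMap (fun sis => sb :: pvSymStrand sis.1 sis.2) := by
  unfold pair_table_to_dot_bracket_alt
  simp only [PySem.List.enumerate_cons, List.foldl_cons, zero_add]
  rw [if_neg (show ¬ ((0 : Int) ≠ 0) from by simp)]
  simp only [List.nil_append, List.length_nil, Nat.cast_zero]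
  rw [phase1Rest sb t 1 (by omega) (List.replicate h.length ".") [(0 : Int)]]
  simp only [List.cons_append, List.nil_append, List.zip_cons_cons, List.foldl_cons]
  rw [show (List.replicate h.length (".") ++ List.flatMap (fun s => sb :: pvDots s) t : List String)
      = ([] : List String) ++ List.replicate h.length "." ++ List.flatMap (fun s => sb :: pvDots s) t
    from by simp]
  rw [patchGen 0 h 0 0 [] (List.flatMap (fun s => sb :: pvDots s) t) (by simp)]
  simp only [List.nil_append]
  rw [show ((PySem.List.enumerate h).map fun dip =>
      match dip.2 with
      | none => "."
      | some pair => pvParen 0 dip.1 pair) = pvSymStrand 0 h from rfl]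
  rw [show (List.replicate h.length ("." : String)).length = (pvSymStrand 0 h).length from by
    simp [pvSymStrand_length]]
  exact phase2Rest sb t 1 (pvSymStrand 0 h)

-- ===== VERDICT (by name: the statement is the Claim_ definition above) =====
theorem pair_table_to_dot_bracket_spec : Claim_equal_pair_table_to_dot_bracket := by
  intro pt sb _ hpre
  unfold Spec_pair_table_to_dot_bracket
  obtain ⟨-, hpre⟩ := hpre
  cases pt with
  | nil => rfl
  | cons h t =>
    have hpre' : t = [] ∨ h ≠ [] := by
      rcases hpre with hl | hn
      · left
        cases t with
        | nil => rfl
        | cons a b => simp at hl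
      · right
        intro hc
        subst hc
        exact hn rfl
    rw [Aclosed sb h t hpre', Bclosed sb h t]
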